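-- pv_equiv track=rewrite | github.com/adaptivecontrolinc/adaptive-api-python | src/adaptive_api/pe.py | to_key_string
-- ===== SOURCE A (Python) =====
-- from typing import List, Dict, Any, Optional, Union, Callable, Tuple
--
-- def to_key_string(key: List[Any]) -> str:
--     """Convert a key array to a string representation."""
--     j = len(key)
--     while j != 0:
--         v = key[j - 1]
--         if v != '' and v != 0:
--             break
--         j -= 1
--
--     return '@'.join('' if it == ' ' else str(it) for it in key[:j])
-- ===== SOURCE B (Python) =====
-- def to_key_string(key):
--     """Convert a key array to a string representation."""
--     parts = []
--     last = 0
--     for i, it in enumerate(key):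
--         parts.append('' if it == ' ' else str(it))
--         if it != '' and it != 0:
--             last = i + 1
--     return '@'.join(parts[:last])
-- ===== Notes on version B (the rewrite author's own statement) =====
-- stated objective: alternative
-- what changed: Replaces A's backward while-loop cutoff scan followed by a separate forward join pass with a single forward pass that simultaneously builds the mapped parts list and tracks the last significant index, slicing once at the end.
import Mathlib
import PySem

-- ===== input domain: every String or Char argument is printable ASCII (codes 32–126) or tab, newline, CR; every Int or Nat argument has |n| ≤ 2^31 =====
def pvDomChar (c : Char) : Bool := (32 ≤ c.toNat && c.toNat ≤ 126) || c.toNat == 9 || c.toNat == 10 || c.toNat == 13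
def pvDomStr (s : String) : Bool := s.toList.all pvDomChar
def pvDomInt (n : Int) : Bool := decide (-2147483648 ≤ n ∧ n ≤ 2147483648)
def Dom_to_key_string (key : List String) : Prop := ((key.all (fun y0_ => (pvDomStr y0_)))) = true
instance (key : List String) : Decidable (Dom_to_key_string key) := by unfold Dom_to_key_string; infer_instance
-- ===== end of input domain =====

-- B replaces A's backward cutoff scan + separate join pass by one forward pass (alternative decomposition, same cost).

-- ===== PORT A =====
-- the backward while loop: j counts down from len(key) until key[j-1] is significant
-- (on List String the Python test `v != '' and v != 0` is exactly v ≠ "", since a str never equals the int 0)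
def to_key_string_cut (key : List String) : Nat → Nat
  | 0 => 0
  | j + 1 => if key.getD j "" ≠ "" then j + 1 else to_key_string_cut key j

def to_key_string (key : List String) : String :=
  let j := to_key_string_cut key key.length
  -- key[:j] with 0 ≤ j ≤ len key is exactly List.take j
  PySem.Str.join "@" ((key.take j).map (fun it => if it = " " then "" else it))

-- ===== PORT B =====
def to_key_string_alt (key : List String) : String :=
  let st := (PySem.List.enumerate key).foldl
    (fun (acc : List String × Nat) p =>
      ((acc.1 ++ [if p.2 = " " then "" else p.2]),
       if p.2 ≠ "" then (p.1 + 1).toNat else acc.2))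
    ([], 0)
  PySem.Str.join "@" (st.1.take st.2)

-- ===== PRECONDITION & SPEC =====
def Spec_to_key_string (key : List String) (out : String) : Prop := out = to_key_string_alt key
instance (key : List String) (out : String) : Decidable (Spec_to_key_string key out) := by unfold Spec_to_key_string; infer_instance

-- ===== CLAIM (what is proved, stated in full; the proofs are below) =====
def Claim_equal_to_key_string : Prop := ∀ (key : List String), Dom_to_key_string key → Spec_to_key_string key (to_key_string key)

-- ===== LEMMAS AND PROOFS =====
-- the cut index only inspects indices < j, so appending one element keeps it
lemma cut_append (key : List String) (v : String) :
    ∀ j, j ≤ key.length → to_key_string_cut (key ++ [v]) j = to_key_string_cut key j := by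
  intro j
  induction j with
  | zero => intro _; rfl
  | succ j ih =>
    intro hj
    have hj' : j < key.length := by omega
    simp only [to_key_string_cut, List.getD, List.getElem?_append_left hj', ih (by omega)]
    rfl

-- B's loop state after the whole list: the mapped parts and A's cut index
lemma loop_state (key : List String) :
    (PySem.List.enumerate key).foldl
      (fun (acc : List String × Nat) p =>
        ((acc.1 ++ [if p.2 = " " then "" else p.2]),
         if p.2 ≠ "" then (p.1 + 1).toNat else acc.2))
      ([], 0)
    = (key.map (fun it => if it = " " then "" else it), to_key_string_cut key key.length) := by
  induction key using List.reverseRecOn with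
  | nil => rfl
  | append_singleton key v ih =>
    rw [show (0 : Int) = 0 + 0 by rfl]
    rw [PySem.List.enumerate_append, List.foldl_append]
    simp only [zero_add] at ih ⊢
    rw [ih]
    simp only [PySem.List.enumerate]
    have hcut : to_key_string_cut (key ++ [v]) (key.length + 1)
        = if v ≠ "" then key.length + 1 else to_key_string_cut key key.length := by
      simp only [to_key_string_cut, List.getD, List.getElem?_concat_length, Option.getD_some,
        cut_append key v key.length (le_refl _)]
    rw [show (key ++ [v]).length = key.length + 1 by simp, hcut]
    by_cases hv : v = ""
    · simp [hv, List.foldl]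
    · simp [hv, List.foldl]

-- ===== VERDICT (by name: the statement is the Claim_ definition above) =====
theorem to_key_string_spec : Claim_equal_to_key_string := by
  intro key _
  unfold Spec_to_key_string to_key_string to_key_string_alt
  rw [loop_state]
  simp [List.map_take]
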